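-- pv_equiv track=rewrite | github.com/aiatx/animal_detect_pc | H_Ground/H_Ground/algorithm.py | _merge_collinear_waypoints
-- ===== SOURCE A (Python) =====
-- def _merge_collinear_waypoints(full_path, checkpoint_indices):
--     """合并共线的连续非检查点，实现已检区域连续跨越
--
--     如果连续多个非检查点（可连续跨越的点）处于同一直线上，
--     则合并为只保留起点和终点，中间不停顿。
--
--     返回: (合并后的路径, 合并后的检查点索引)
--     """
--     if len(full_path) < 3:
--         return full_path, checkpoint_indices
--
--     checkpoint_set = set(checkpoint_indices)
--     merged_path = []
--     merged_checkpoints = []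
--
--     i = 0
--     while i < len(full_path):
--         current_in_merged_idx = len(merged_path)
--         merged_path.append(full_path[i])
--
--         # 如果是检查点，记录索引
--         if i in checkpoint_set:
--             merged_checkpoints.append(current_in_merged_idx)
--             i += 1
--             continue
--
--         # 非检查点：尝试向前合并连续共线的非检查点
--         j = i + 1
--
--         # 找到下一个检查点或路径末尾
--         while j < len(full_path) and j not in checkpoint_set:
--             j += 1
--
--         # 在 i 到 j-1 之间，检查是否共线并可以合并
--         if j - i > 1:
--             # 有多个连续非检查点，检查是否共线
--             segment = full_path[i:j]
--
--             # 检查共线性：所有相邻向量方向是否相同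
--             directions = []
--             for k in range(len(segment) - 1):
--                 dx = segment[k + 1][0] - segment[k][0]
--                 dy = segment[k + 1][1] - segment[k][1]
--                 directions.append((dx, dy))
--
--             # 如果所有方向都相同（共线），直接跳到段末
--             all_same_direction = len(set(directions)) == 1
--
--             if all_same_direction:
--                 # 共线：跳过中间的点，直接到段末
--                 i = j - 1
--             else:
--                 # 不共线：需要保留转向点
--                 # 向前查找所有需要保留的转向点
--                 last_dir = None
--                 for k in range(i + 1, j):
--                     dx = full_path[k][0] - full_path[k - 1][0]
--                     dy = full_path[k][1] - full_path[k - 1][1]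
--                     curr_dir = (dx, dy)
--
--                     if last_dir is not None and curr_dir != last_dir:
--                         # 检测到转向，保留前一个点
--                         merged_path.append(full_path[k - 1])
--
--                     last_dir = curr_dir
--
--                 i = j - 1
--         else:
--             i += 1
--
--     return merged_path, merged_checkpoints
-- ===== SOURCE B (Python) =====
-- def _merge_collinear_waypoints(full_path, checkpoint_indices):
--     """Single flat pass: keep checkpoints, run boundaries, and corners."""
--     if len(full_path) < 3:
--         return full_path, checkpoint_indices
--
--     checkpoint_set = set(checkpoint_indices)
--     n = len(full_path)
--     merged_path = []
--     merged_checkpoints = []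
--
--     for i in range(n):
--         p = full_path[i]
--         if i in checkpoint_set:
--             merged_checkpoints.append(len(merged_path))
--             merged_path.append(p)
--         elif (i == 0 or i == n - 1
--               or (i - 1) in checkpoint_set or (i + 1) in checkpoint_set):
--             # first or last point of a maximal non-checkpoint run
--             merged_path.append(p)
--         else:
--             a = full_path[i - 1]
--             c = full_path[i + 1]
--             if (p[0] - a[0], p[1] - a[1]) != (c[0] - p[0], c[1] - p[1]):
--                 # corner inside a run
--                 merged_path.append(p)
--
--     return merged_path, merged_checkpoints
-- ===== Notes on version B (the rewrite author's own statement) =====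
-- stated objective: simpler
-- what changed: A's jumping while-loop that slices out each inter-checkpoint segment, builds a direction list, a set-cardinality collinearity test and a separate turn-scan is replaced by one flat pass over full_path that keeps a point iff it is a checkpoint, a boundary of a maximal non-checkpoint run, or a corner where the incoming and outgoing step directions differ.
import Mathlib
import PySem

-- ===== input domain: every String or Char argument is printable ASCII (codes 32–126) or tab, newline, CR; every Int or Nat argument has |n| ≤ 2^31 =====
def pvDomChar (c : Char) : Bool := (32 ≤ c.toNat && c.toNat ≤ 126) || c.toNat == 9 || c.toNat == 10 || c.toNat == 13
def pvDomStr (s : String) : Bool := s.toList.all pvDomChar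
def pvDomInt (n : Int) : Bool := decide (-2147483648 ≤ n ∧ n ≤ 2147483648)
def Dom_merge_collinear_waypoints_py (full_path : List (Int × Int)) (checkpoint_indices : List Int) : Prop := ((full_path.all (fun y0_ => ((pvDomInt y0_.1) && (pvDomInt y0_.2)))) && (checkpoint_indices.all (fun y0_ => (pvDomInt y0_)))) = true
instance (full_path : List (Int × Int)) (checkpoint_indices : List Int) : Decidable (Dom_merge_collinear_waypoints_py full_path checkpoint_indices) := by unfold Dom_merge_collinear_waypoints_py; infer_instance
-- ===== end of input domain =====

-- B replaces A's jumpy while-loop with inter-checkpoint segment scans by one flat pass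
-- that keeps checkpoints, run boundaries and corners (objective: simpler decomposition).

-- ===== PORT A =====
-- inner 'while j < len(full_path) and j not in checkpoint_set: j += 1'
def pvFindJ (path : List (Int × Int)) (cset : List Int) (j : Nat) : Nat :=
  if _h : j < path.length then
    if (j : Int) ∈ cset then j else pvFindJ path cset (j + 1)
  else j
termination_by path.length - j

-- 'for k in range(len(segment)-1): directions.append((dx, dy))'
-- (k runs over 0..len-2, all nonnegative, so a Nat range and List.getD are exact here)
def pvDirections (seg : List (Int × Int)) : List (Int × Int) :=
  (List.range (seg.length - 1)).foldl
    (fun acc k =>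
      acc ++ [((seg.getD (k + 1) (0, 0)).1 - (seg.getD k (0, 0)).1,
               (seg.getD (k + 1) (0, 0)).2 - (seg.getD k (0, 0)).2)]) []

-- 'for k in range(i+1, j): …' of the non-collinear branch (k ≥ 1 throughout, so
-- List.getD with a Nat index is exact for full_path[k] / full_path[k-1])
def pvTurns (path : List (Int × Int)) (j : Nat) (k : Nat) (last : Option (Int × Int))
    (mp : List (Int × Int)) : List (Int × Int) :=
  if k < j then
    let d : Int × Int := ((path.getD k (0, 0)).1 - (path.getD (k - 1) (0, 0)).1,
                          (path.getD k (0, 0)).2 - (path.getD (k - 1) (0, 0)).2)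
    let mp' : List (Int × Int) :=
      match last with
      | none => mp
      | some l => if d ≠ l then mp ++ [path.getD (k - 1) (0, 0)] else mp
    pvTurns path j (k + 1) (some d) mp'
  else mp
termination_by j - k

-- the outer 'while i < len(full_path):' loop of A
def pvLoopA (path : List (Int × Int)) (cset : List Int) (i : Nat)
    (mp : List (Int × Int)) (mc : List Int) : (List (Int × Int)) × List Int :=
  if _h : i < path.length then
    let cur : Int := mp.length
    let mp' := mp ++ [path.getD i (0, 0)]
    if (i : Int) ∈ cset then
      pvLoopA path cset (i + 1) mp' (mc ++ [cur])
    else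
      let j := pvFindJ path cset (i + 1)
      if _h2 : 1 < j - i then
        let seg := PySem.List.slice path (some (i : Int)) (some (j : Int))
        let dirs := pvDirections seg
        if (PySem.Set.ofList dirs).length = 1 then
          pvLoopA path cset (j - 1) mp' mc
        else
          pvLoopA path cset (j - 1) (pvTurns path j (i + 1) none mp') mc
      else
        pvLoopA path cset (i + 1) mp' mc
  else (mp, mc)
termination_by path.length - i
decreasing_by all_goals omega

def merge_collinear_waypoints_py (full_path : List (Int × Int)) (checkpoint_indices : List Int) :
    (List (Int × Int)) × List Int :=
  if full_path.length < 3 then (full_path, checkpoint_indices)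
  else pvLoopA full_path (PySem.Set.ofList checkpoint_indices) 0 [] []

-- ===== PORT B =====
-- 'for i in range(n):' — one flat pass (indices i-1, i, i+1 are only read when in range)
def pvLoopB (path : List (Int × Int)) (cset : List Int) (i : Nat)
    (mp : List (Int × Int)) (mc : List Int) : (List (Int × Int)) × List Int :=
  if i < path.length then
    let p := path.getD i (0, 0)
    if (i : Int) ∈ cset then
      pvLoopB path cset (i + 1) (mp ++ [p]) (mc ++ [(mp.length : Int)])
    else if i = 0 ∨ i = path.length - 1 ∨ ((i : Int) - 1) ∈ cset ∨ ((i : Int) + 1) ∈ cset then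
      pvLoopB path cset (i + 1) (mp ++ [p]) mc
    else
      let a := path.getD (i - 1) (0, 0)
      let c := path.getD (i + 1) (0, 0)
      if (p.1 - a.1, p.2 - a.2) ≠ (c.1 - p.1, c.2 - p.2) then
        pvLoopB path cset (i + 1) (mp ++ [p]) mc
      else
        pvLoopB path cset (i + 1) mp mc
  else (mp, mc)
termination_by path.length - i

def merge_collinear_waypoints_py_alt (full_path : List (Int × Int)) (checkpoint_indices : List Int) :
    (List (Int × Int)) × List Int :=
  if full_path.length < 3 then (full_path, checkpoint_indices)
  else pvLoopB full_path (PySem.Set.ofList checkpoint_indices) 0 [] []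

-- ===== PRECONDITION & SPEC =====
def Spec_merge_collinear_waypoints_py (full_path : List (Int × Int)) (checkpoint_indices : List Int) (out : (List (Int × Int)) × List Int) : Prop := out = merge_collinear_waypoints_py_alt full_path checkpoint_indices
instance (full_path : List (Int × Int)) (checkpoint_indices : List Int) (out : (List (Int × Int)) × List Int) : Decidable (Spec_merge_collinear_waypoints_py full_path checkpoint_indices out) := by unfold Spec_merge_collinear_waypoints_py; infer_instance

-- ===== CLAIM (what is proved, stated in full; the proofs are below) =====
def Claim_equal_merge_collinear_waypoints_py : Prop := ∀ (full_path : List (Int × Int)) (checkpoint_indices : List Int), Dom_merge_collinear_waypoints_py full_path checkpoint_indices → Spec_merge_collinear_waypoints_py full_path checkpoint_indices (merge_collinear_waypoints_py full_path checkpoint_indices)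

-- ===== LEMMAS AND PROOFS =====

-- direction of the step into index t (defeq to the inline expressions of both ports)
def pvDir (path : List (Int × Int)) (t : Nat) : Int × Int :=
  ((path.getD t (0, 0)).1 - (path.getD (t - 1) (0, 0)).1,
   (path.getD t (0, 0)).2 - (path.getD (t - 1) (0, 0)).2)

theorem pvFindJ_ge (path : List (Int × Int)) (cset : List Int) (j : Nat) :
    j ≤ pvFindJ path cset j := by
  fun_induction pvFindJ path cset j with
  | case1 j h hm => exact le_refl _
  | case2 j h hm ih => omega
  | case3 j h => exact le_refl _

theorem pvFindJ_le (path : List (Int × Int)) (cset : List Int) (j : Nat)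
    (hj : j ≤ path.length) : pvFindJ path cset j ≤ path.length := by
  fun_induction pvFindJ path cset j with
  | case1 j h hm => exact hj
  | case2 j h hm ih => exact ih (by omega)
  | case3 j h => exact hj

theorem pvFindJ_not_mem (path : List (Int × Int)) (cset : List Int) (j : Nat) :
    ∀ t, j ≤ t → t < pvFindJ path cset j → ((t : Int) ∉ cset) := by
  fun_induction pvFindJ path cset j with
  | case1 j h hm => intro t h1 h2; omega
  | case2 j h hm ih =>
      intro t h1 h2
      rcases Nat.eq_or_lt_of_le h1 with h1 | h1
      · subst h1; exact hm
      · exact ih t (by omega) h2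
  | case3 j h => intro t h1 h2; omega

theorem pvFindJ_mem (path : List (Int × Int)) (cset : List Int) (j : Nat)
    (h : pvFindJ path cset j < path.length) : ((pvFindJ path cset j : Int) ∈ cset) := by
  fun_induction pvFindJ path cset j with
  | case1 j h' hm => exact hm
  | case2 j h' hm ih => exact ih h
  | case3 j h' => omega

-- pvTurns appends nothing when all directions in the remaining range agree
theorem pvTurns_const (path : List (Int × Int)) (j : Nat) (d : Int × Int) :
    ∀ fuel k acc, j - k ≤ fuel → (∀ t, k ≤ t → t < j → pvDir path t = d) →
      pvTurns path j k (some d) acc = acc := by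
  intro fuel
  induction fuel with
  | zero =>
      intro k acc hf _
      rw [pvTurns]
      simp only [if_neg (by omega : ¬ k < j)]
  | succ f ih =>
      intro k acc hf hall
      rw [pvTurns]
      by_cases hk : k < j
      · simp only [if_pos hk]
        have hd : ((path.getD k (0, 0)).1 - (path.getD (k - 1) (0, 0)).1,
                   (path.getD k (0, 0)).2 - (path.getD (k - 1) (0, 0)).2) = d :=
          hall k (le_refl _) hk
        rw [hd]
        simp only [ne_eq, not_true_eq_false, ite_false]
        exact ih (k + 1) acc (by omega) (fun t h1 h2 => hall t (by omega) h2)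
      · simp only [if_neg hk]

-- B's flat pass across the interior of a non-checkpoint run i.e. from m up to j-1
-- equals pvTurns' corner emissions followed by the run's last point.
theorem pvStepsB (path : List (Int × Int)) (cset : List Int) (j : Nat)
    (hjn : j ≤ path.length) (hjc : j = path.length ∨ (j : Int) ∈ cset) :
    ∀ fuel m acc mc, j - m ≤ fuel → 1 ≤ m → m ≤ j - 1 → 2 ≤ j →
      (((m - 1 : Nat) : Int) ∉ cset) →
      (∀ t, m ≤ t → t < j → ((t : Int) ∉ cset)) →
      pvLoopB path cset m acc mc =
        pvLoopB path cset j
          (pvTurns path j (m + 1) (some (pvDir path m)) acc ++ [path.getD (j - 1) (0, 0)]) mc := by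
  intro fuel
  induction fuel with
  | zero => intro m acc mc hf h1 h2 h3 hprev hrun; omega
  | succ f ih =>
      intro m acc mc hf h1 h2 h3 hprev hrun
      by_cases hm : m = j - 1
      · -- base: the last point of the run
        subst hm
        rw [pvLoopB]
        have hlt : j - 1 < path.length := by omega
        simp only [if_pos hlt]
        rw [if_neg (hrun (j - 1) (le_refl _) (by omega))]
        have hbd : j - 1 = 0 ∨ j - 1 = path.length - 1 ∨ (((j - 1 : Nat) : Int) - 1) ∈ cset ∨
            (((j - 1 : Nat) : Int) + 1) ∈ cset := by
          rcases hjc with h | h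
          · right; left; omega
          · right; right; right
            have : ((j - 1 : Nat) : Int) + 1 = (j : Int) := by push_cast [Nat.cast_sub (by omega : 1 ≤ j)]; ring
            rw [this]; exact h
        rw [if_pos hbd]
        have hT : pvTurns path j (j - 1 + 1) (some (pvDir path (j - 1))) acc = acc := by
          rw [pvTurns]; simp only [if_neg (by omega : ¬ j - 1 + 1 < j)]
        rw [hT]
        have e : j - 1 + 1 = j := by omega
        rw [e]
      · -- step: an interior point of the run
        have hmj : m < j - 1 := by omega
        rw [pvLoopB]
        have hlt : m < path.length := by omega
        simp only [if_pos hlt]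
        rw [if_neg (hrun m (le_refl _) (by omega))]
        have hbd : ¬ (m = 0 ∨ m = path.length - 1 ∨ ((m : Int) - 1) ∈ cset ∨ ((m : Int) + 1) ∈ cset) := by
          push_neg
          refine ⟨by omega, by omega, ?_, ?_⟩
          · have : (m : Int) - 1 = ((m - 1 : Nat) : Int) := by push_cast [Nat.cast_sub (by omega : 1 ≤ m)]; ring
            rw [this]; exact hprev
          · have : (m : Int) + 1 = ((m + 1 : Nat) : Int) := by push_cast; ring
            rw [this]; exact hrun (m + 1) (by omega) (by omega)
        rw [if_neg hbd]
        -- the corner test and pvTurns' step at k = m+1 are the same (symmetric) inequality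
        have hT : pvTurns path j (m + 1) (some (pvDir path m)) acc =
            pvTurns path j (m + 2)
              (some (pvDir path (m + 1)))
              (if pvDir path (m + 1) ≠ pvDir path m
               then acc ++ [path.getD m (0, 0)] else acc) := by
          rw [pvTurns]
          simp only [if_pos (by omega : m + 1 < j)]
          have hk1 : m + 1 - 1 = m := by omega
          simp only [hk1]
          rfl
        by_cases hne : pvDir path m = pvDir path (m + 1)
        · have hcond : ¬ (((path.getD m (0, 0)).1 - (path.getD (m - 1) (0, 0)).1,
              (path.getD m (0, 0)).2 - (path.getD (m - 1) (0, 0)).2) ≠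
              ((path.getD (m + 1) (0, 0)).1 - (path.getD m (0, 0)).1,
               (path.getD (m + 1) (0, 0)).2 - (path.getD m (0, 0)).2)) := by
            simp only [ne_eq, not_not]
            have := hne
            simp only [pvDir] at this
            simpa [Nat.add_sub_cancel] using this
          rw [if_neg hcond]
          rw [hT, if_neg (by simp [hne])]
          exact ih (m + 1) acc mc (by omega) (by omega) (by omega) h3
            (by simpa [Nat.add_sub_cancel] using hrun m (le_refl _) (by omega))
            (fun t ht1 ht2 => hrun t (by omega) ht2)
        · have hcond : (((path.getD m (0, 0)).1 - (path.getD (m - 1) (0, 0)).1,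
              (path.getD m (0, 0)).2 - (path.getD (m - 1) (0, 0)).2) ≠
              ((path.getD (m + 1) (0, 0)).1 - (path.getD m (0, 0)).1,
               (path.getD (m + 1) (0, 0)).2 - (path.getD m (0, 0)).2)) := by
            intro hc
            apply hne
            simp only [pvDir]
            simpa [Nat.add_sub_cancel] using hc
          rw [if_pos hcond]
          rw [hT, if_pos (by simp [ne_eq]; intro hc; exact hne hc.symm)]
          exact ih (m + 1) (acc ++ [path.getD m (0, 0)]) mc (by omega) (by omega) (by omega) h3
            (by simpa [Nat.add_sub_cancel] using hrun m (le_refl _) (by omega))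
            (fun t ht1 ht2 => hrun t (by omega) ht2)

-- elements of the slice full_path[i:j]
theorem pvSeg_getD (path : List (Int × Int)) (i j : Nat) (hj : j ≤ path.length) (u : Nat)
    (hu : u < j - i) :
    (PySem.List.slice path (some (i : Int)) (some (j : Int))).getD u (0, 0) =
      path.getD (i + u) (0, 0) := by
  rw [PySem.List.slice_natCast]
  have h1 : i + u < path.length := by omega
  rw [List.getD_eq_getElem?_getD, List.getD_eq_getElem?_getD]
  rw [List.getElem?_take_of_lt hu, List.getElem?_drop]

-- 'len(set(directions)) == 1' forces every direction in the run to agree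
theorem pvAllSame (path : List (Int × Int)) (i j : Nat)
    (hij : i + 2 ≤ j) (hj : j ≤ path.length)
    (hset : (PySem.Set.ofList
        (pvDirections (PySem.List.slice path (some (i : Int)) (some (j : Int))))).length = 1) :
    ∀ t, i + 1 ≤ t → t < j → pvDir path t = pvDir path (i + 1) := by
  set seg := PySem.List.slice path (some (i : Int)) (some (j : Int)) with hseg
  have hlen : seg.length = j - i := by
    rw [hseg, PySem.List.slice_natCast, List.length_take, List.length_drop]
    omega
  have hdir : pvDirections seg = (List.range (seg.length - 1)).map
      (fun k => ((seg.getD (k + 1) (0, 0)).1 - (seg.getD k (0, 0)).1,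
                 (seg.getD (k + 1) (0, 0)).2 - (seg.getD k (0, 0)).2)) := by
    rw [pvDirections]
    exact (PySem.List.foldl_append_singleton_eq_map _ _ []).trans (by simp)
  obtain ⟨d0, hd0⟩ := List.length_eq_one_iff.mp hset
  have hall : ∀ x ∈ pvDirections seg, x = d0 := by
    intro x hx
    have : x ∈ PySem.Set.ofList (pvDirections seg) := by
      rw [PySem.Set.mem_ofList]; exact hx
    rw [hd0] at this
    simpa using this
  have hval : ∀ k, k < j - i - 1 →
      ((seg.getD (k + 1) (0, 0)).1 - (seg.getD k (0, 0)).1,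
       (seg.getD (k + 1) (0, 0)).2 - (seg.getD k (0, 0)).2) = d0 := by
    intro k hk
    apply hall
    rw [hdir]
    exact List.mem_map.mpr ⟨k, List.mem_range.mpr (by omega), rfl⟩
  have hdirAt : ∀ t, i + 1 ≤ t → t < j → pvDir path t = d0 := by
    intro t h1 h2
    have hk : t - i - 1 < j - i - 1 := by omega
    have := hval (t - i - 1) hk
    rw [pvSeg_getD path i j hj _ (by omega), pvSeg_getD path i j hj _ (by omega)] at this
    have e1 : i + (t - i - 1 + 1) = t := by omega
    have e2 : i + (t - i - 1) = t - 1 := by omega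
    rw [e1, e2] at this
    exact this
  intro t h1 h2
  rw [hdirAt t h1 h2, hdirAt (i + 1) (le_refl _) (by omega)]

-- main correspondence between A's jumping loop and B's flat pass, at A-visitable indices
theorem pvMain (path : List (Int × Int)) (cset : List Int) :
    ∀ fuel i mp mc, path.length - i ≤ fuel →
      (i = 0 ∨ (i : Int) ∈ cset ∨ ((i : Int) - 1) ∈ cset ∨ i + 1 = path.length ∨
        ((i : Int) + 1) ∈ cset ∨ i = path.length) →
      pvLoopA path cset i mp mc = pvLoopB path cset i mp mc := by
  intro fuel
  induction fuel with
  | zero =>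
      intro i mp mc hf hvis
      rw [pvLoopA, pvLoopB]
      simp only [dif_neg (by omega : ¬ i < path.length), if_neg (by omega : ¬ i < path.length)]
  | succ f ih =>
      intro i mp mc hf hvis
      by_cases hi : i < path.length
      · rw [pvLoopA, pvLoopB]
        simp only [dif_pos hi, if_pos hi]
        by_cases hc : (i : Int) ∈ cset
        · simp only [if_pos hc]
          exact ih (i + 1) _ _ (by omega)
            (Or.inr (Or.inr (Or.inl (by push_cast; simpa using hc))))
        · simp only [if_neg hc]
          set j := pvFindJ path cset (i + 1) with hjdef
          have hjge : i + 1 ≤ j := pvFindJ_ge path cset (i + 1)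
          have hjle : j ≤ path.length := pvFindJ_le path cset (i + 1) (by omega)
          have hjrun : ∀ t, i + 1 ≤ t → t < j → ((t : Int) ∉ cset) :=
            pvFindJ_not_mem path cset (i + 1)
          have hjc : j = path.length ∨ (j : Int) ∈ cset := by
            by_cases h : j < path.length
            · exact Or.inr (pvFindJ_mem path cset (i + 1) h)
            · exact Or.inl (by omega)
          -- B takes the boundary branch at i in every case below
          have hbd : i = 0 ∨ i = path.length - 1 ∨ ((i : Int) - 1) ∈ cset ∨ ((i : Int) + 1) ∈ cset := by
            rcases hvis with h | h | h | h | h | h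
            · exact Or.inl h
            · exact absurd h hc
            · exact Or.inr (Or.inr (Or.inl h))
            · exact Or.inr (Or.inl (by omega))
            · exact Or.inr (Or.inr (Or.inr h))
            · omega
          rw [if_pos hbd]
          by_cases h2 : 1 < j - i
          · simp only [dif_pos h2]
            -- the run i .. j-1: B walks it point by point
            have hstep := pvStepsB path cset j hjle hjc (f + 1) (i + 1)
              (mp ++ [path.getD i (0, 0)]) mc (by omega) (by omega) (by omega) (by omega)
              (by simpa [Nat.add_sub_cancel] using hc)
              (fun t ht1 ht2 => hjrun t ht1 ht2)
            -- A-visitability of j-1 (its successor j is a checkpoint or the path end)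
            have hvis' : j - 1 = 0 ∨ ((j - 1 : Nat) : Int) ∈ cset ∨ (((j - 1 : Nat) : Int) - 1) ∈ cset ∨
                (j - 1) + 1 = path.length ∨ (((j - 1 : Nat) : Int) + 1) ∈ cset ∨ j - 1 = path.length := by
              rcases hjc with h | h
              · right; right; right; left; omega
              · right; right; right; right; left
                have : ((j - 1 : Nat) : Int) + 1 = (j : Int) := by
                  push_cast [Nat.cast_sub (by omega : 1 ≤ j)]; ring
                rw [this]; exact h
            -- B at j-1 then appends the run's end and moves to j
            have hbase := pvStepsB path cset j hjle hjc 1 (j - 1)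
              (pvTurns path j (i + 2) (some (pvDir path (i + 1))) (mp ++ [path.getD i (0, 0)])) mc
              (by omega) (by omega) (by omega) (by omega)
              (by
                have e : j - 1 - 1 = j - 2 := by omega
                rw [e]
                by_cases hji : j = i + 2
                · have : ((j - 2 : Nat) : Int) = (i : Int) := by omega
                  rw [this]; exact hc
                · exact hjrun (j - 2) (by omega) (by omega))
              (fun t ht1 ht2 => hjrun t (by omega) ht2)
            have hbaseT : pvTurns path j (j - 1 + 1) (some (pvDir path (j - 1)))
                (pvTurns path j (i + 2) (some (pvDir path (i + 1))) (mp ++ [path.getD i (0, 0)]))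
                = pvTurns path j (i + 2) (some (pvDir path (i + 1))) (mp ++ [path.getD i (0, 0)]) := by
              rw [pvTurns]; simp only [if_neg (by omega : ¬ j - 1 + 1 < j)]
            rw [hbaseT] at hbase
            by_cases hall : (PySem.Set.ofList (pvDirections
                (PySem.List.slice path (some (i : Int)) (some (j : Int))))).length = 1
            · rw [if_pos hall]
              -- collinear: pvTurns emits nothing
              have hsame := pvAllSame path i j (by omega) hjle hall
              have hT0 : pvTurns path j (i + 2) (some (pvDir path (i + 1)))
                  (mp ++ [path.getD i (0, 0)]) = mp ++ [path.getD i (0, 0)] := by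
                apply pvTurns_const path j (pvDir path (i + 1)) (j - (i + 2)) (i + 2) _ (le_refl _)
                intro t ht1 ht2
                exact hsame t (by omega) ht2
              rw [hT0] at hstep hbase
              rw [ih (j - 1) (mp ++ [path.getD i (0, 0)]) mc (by omega) hvis', hbase, hstep]
            · rw [if_neg hall]
              -- non-collinear: A's explicit turn loop; its first iteration has last_dir = None
              have hT1 : pvTurns path j (i + 1) none (mp ++ [path.getD i (0, 0)]) =
                  pvTurns path j (i + 2) (some (pvDir path (i + 1))) (mp ++ [path.getD i (0, 0)]) := by
                rw [pvTurns]
                simp only [if_pos (by omega : i + 1 < j)]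
                have e : i + 1 - 1 = i := by omega
                simp only [e]
                rfl
              rw [hT1, hstep]
              rw [ih (j - 1) _ mc (by omega) hvis']
              exact hbase
          · simp only [dif_neg h2]
            -- j = i+1: single non-checkpoint point, both move to i+1
            have hji : j = i + 1 := by omega
            have hvis' : (i + 1) = 0 ∨ ((i + 1 : Nat) : Int) ∈ cset ∨ (((i + 1 : Nat) : Int) - 1) ∈ cset ∨
                (i + 1) + 1 = path.length ∨ (((i + 1 : Nat) : Int) + 1) ∈ cset ∨ i + 1 = path.length := by
              rcases hjc with h | h
              · right; right; right; right; right; omega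
              · right; left; rw [hji] at h; push_cast at h ⊢; exact h
            exact ih (i + 1) _ _ (by omega) hvis'
      · rw [pvLoopA, pvLoopB]
        simp only [dif_neg hi, if_neg hi]

-- ===== VERDICT (by name: the statement is the Claim_ definition above) =====
theorem merge_collinear_waypoints_py_spec : Claim_equal_merge_collinear_waypoints_py := by
  intro full_path checkpoint_indices _
  unfold Spec_merge_collinear_waypoints_py
  unfold merge_collinear_waypoints_py merge_collinear_waypoints_py_alt
  by_cases h : full_path.length < 3
  · rw [if_pos h, if_pos h]
  · rw [if_neg h, if_neg h]
    exact pvMain full_path (PySem.Set.ofList checkpoint_indices) full_path.length 0 [] []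
      (by omega) (Or.inl rfl)
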